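-- pv_equiv track=rewrite | github.com/miliar/Code_Jam_Webscraper | solutions_python/solutions_year14_round0_nr4/1729.py | do
-- ===== SOURCE A (Python) =====
-- import copy
--
-- def do(nao, ken):
--     nao = copy.copy(nao)
--     ken = copy.copy(ken)
--     point = 0
--     # Loop
--     while len(nao) and len(ken):
--         if nao[len(nao)-1] < ken[len(ken)-1]:
--             nao.pop(len(nao)-1)
--             ken.pop(0)
--         else:
--             nao.pop(len(nao)-1)
--             ken.pop(len(ken)-1)
--             point += 1
--     return point
-- ===== SOURCE B (Python) =====
-- def do(nao, ken):
--     n, m = len(nao), len(ken)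
--     point = 0
--     for t in range(min(n, m)):
--         if nao[n - 1 - t] >= ken[m - 1 - point]:
--             point += 1
--     return point
-- ===== Notes on version B (the rewrite author's own statement) =====
-- stated objective: simpler
-- what changed: Replaces A's destructive while-loop that copies both lists and pops nao's back plus ken's front or back each round by a non-mutating fixed-length for-loop over min(n,m) with a single point counter used to index ken from the back (the discarded ken-front values are never read, so the front pointer and both pops disappear).
import Mathlib
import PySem

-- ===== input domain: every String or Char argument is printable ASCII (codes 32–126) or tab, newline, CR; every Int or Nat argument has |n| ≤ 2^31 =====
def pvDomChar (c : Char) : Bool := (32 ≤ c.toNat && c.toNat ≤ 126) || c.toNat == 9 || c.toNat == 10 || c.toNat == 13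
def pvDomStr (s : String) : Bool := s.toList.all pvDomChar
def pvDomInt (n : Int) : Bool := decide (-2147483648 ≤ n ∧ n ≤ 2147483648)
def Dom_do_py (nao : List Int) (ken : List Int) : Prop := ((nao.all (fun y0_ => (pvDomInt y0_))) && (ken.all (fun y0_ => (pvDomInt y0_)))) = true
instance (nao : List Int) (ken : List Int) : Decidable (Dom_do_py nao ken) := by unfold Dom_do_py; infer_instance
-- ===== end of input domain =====

-- B replaces A's destructive two-branch while-with-pops by a non-mutating fixed-length
-- single-counter scan (simpler); neither version mutates its caller's lists (A copies first).

-- ===== PORT A =====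
-- A's while loop: both lists nonempty; nao[-1] < ken[-1] → pop nao back, pop ken front;
-- else pop both backs and count a point.  nao[len-1] on a nonempty list = getLast (index
-- is in range, so exact); pop(len-1) = dropLast; pop(0) = tail.
def doPyLoop (nao : List Int) (ken : List Int) (point : Int) : Int :=
  if h : nao ≠ [] ∧ ken ≠ [] then
    if nao.getLast h.1 < ken.getLast h.2 then
      doPyLoop nao.dropLast ken.tail point
    else
      doPyLoop nao.dropLast ken.dropLast (point + 1)
  else point
termination_by nao.length
decreasing_by
  all_goals
    simp only [List.length_dropLast]
    have := List.length_pos_iff.mpr h.1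
    omega

def do_py (nao : List Int) (ken : List Int) : Int := doPyLoop nao ken 0

-- ===== PORT B =====
-- B's for-loop over range(min(n,m)).  Both indices n-1-t and m-1-point are provably in
-- range (t < min n m and point ≤ t), so getD with default 0 and Int.toNat are exact here.
def do_py_alt (nao : List Int) (ken : List Int) : Int :=
  let n := nao.length
  let m := ken.length
  (List.range (min n m)).foldl
    (fun point t =>
      if nao.getD (n - 1 - t) 0 ≥ ken.getD (m - 1 - point.toNat) 0 then point + 1 else point)
    0

-- ===== PRECONDITION & SPEC =====
def Spec_do_py (nao : List Int) (ken : List Int) (out : Int) : Prop := out = do_py_alt nao ken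
instance (nao : List Int) (ken : List Int) (out : Int) : Decidable (Spec_do_py nao ken out) := by unfold Spec_do_py; infer_instance

-- ===== CLAIM (what is proved, stated in full; the proofs are below) =====
def Claim_equal_do_py : Prop := ∀ (nao : List Int) (ken : List Int), Dom_do_py nao ken → Spec_do_py nao ken (do_py nao ken)

-- ===== LEMMAS AND PROOFS =====

-- A's loop with the accumulator stripped off.
def specC (nao : List Int) (ken : List Int) : Int :=
  if h : nao ≠ [] ∧ ken ≠ [] then
    if nao.getLast h.1 < ken.getLast h.2 then
      specC nao.dropLast ken.tail
    else
      1 + specC nao.dropLast ken.dropLast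
  else 0
termination_by nao.length
decreasing_by
  all_goals
    simp only [List.length_dropLast]
    have := List.length_pos_iff.mpr h.1
    omega

-- The same count on the REVERSED lists with explicit fuel; the ken-front pops of A are
-- dropped entirely (they only discard elements the fuel bound never reaches).
def specE : Nat → List Int → List Int → Int
  | 0, _, _ => 0
  | _ + 1, [], _ => 0
  | _ + 1, _, [] => 0
  | f + 1, a :: ra, k :: rk => if a < k then specE f ra (k :: rk) else 1 + specE f ra rk

theorem doPyLoop_eq (nao ken : List Int) (p : Int) :
    doPyLoop nao ken p = p + specC nao ken := by
  induction nao, ken, p using doPyLoop.induct with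
  | case1 nao ken p h hlt ih =>
      rw [doPyLoop, dif_pos h, if_pos hlt, specC, dif_pos h, if_pos hlt, ih]
  | case2 nao ken p h hlt ih =>
      rw [doPyLoop, dif_pos h, if_neg hlt, specC, dif_pos h, if_neg hlt, ih]; ring
  | case3 nao ken p h =>
      rw [doPyLoop, dif_neg h, specC, dif_neg h]; ring

theorem take_pred_eq {l l' : List Int} {f : Nat} (h : l.take (f + 1) = l'.take (f + 1)) :
    l.take f = l'.take f := by
  have h2 := congrArg (List.take f) h
  simpa [List.take_take, Nat.min_eq_left (Nat.le_succ f)] using h2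

-- specE only looks at the first `f` elements of its second list.
theorem specE_congr (f : Nat) : ∀ (ra rk rk' : List Int), rk.take f = rk'.take f →
    specE f ra rk = specE f ra rk' := by
  induction f with
  | zero => intro ra rk rk' _; rfl
  | succ f ih =>
      intro ra rk rk' h
      match ra, rk, rk' with
      | [], _, _ => rfl
      | a :: ra, [], rk' =>
          simp only [List.take_nil] at h
          have hnil : rk' = [] := (List.take_eq_nil_iff.mp h.symm).resolve_left (by omega)
          rw [hnil]
      | a :: ra, k :: rk, [] =>
          simp [List.take_succ_cons] at h
      | a :: ra, k :: rk, k' :: rk' =>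
          have h0 := h
          rw [List.take_succ_cons, List.take_succ_cons] at h
          injection h with hk ht
          subst hk
          simp only [specE]
          split
          · exact ih ra (k :: rk) (k :: rk') (take_pred_eq h0)
          · rw [ih ra rk rk' ht]

theorem take_dropLast_eq (l : List Int) (f : Nat) (hf : f ≤ l.length - 1) :
    l.dropLast.take f = l.take f := by
  rw [List.dropLast_eq_take, List.take_take, Nat.min_eq_left hf]

theorem tail_reverse (l : List Int) : l.tail.reverse = l.reverse.dropLast := by
  cases l with
  | nil => rfl
  | cons c t => simp

theorem specC_eq_specE (nao ken : List Int) :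
    specC nao ken = specE (min nao.length ken.length) nao.reverse ken.reverse := by
  induction nao, ken using specC.induct with
  | case1 nao ken h hlt ih =>
      have hn := List.length_pos_iff.mpr h.1
      have hm := List.length_pos_iff.mpr h.2
      have hmin : min nao.length ken.length =
          min nao.dropLast.length ken.tail.length + 1 := by
        simp only [List.length_dropLast, List.length_tail]; omega
      have hra : nao.reverse = nao.getLast h.1 :: nao.dropLast.reverse := by
        conv_lhs => rw [← List.dropLast_append_getLast h.1]
        simp
      have hrk : ken.reverse = ken.getLast h.2 :: ken.dropLast.reverse := by
        conv_lhs => rw [← List.dropLast_append_getLast h.2]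
        simp
      rw [specC, dif_pos h, if_pos hlt, ih, hmin, hra, hrk]
      simp only [specE, if_pos hlt]
      apply specE_congr
      rw [← hrk, tail_reverse]
      exact take_dropLast_eq _ _ (by simp only [List.length_reverse, List.length_dropLast, List.length_tail]; omega)
  | case2 nao ken h hlt ih =>
      have hn := List.length_pos_iff.mpr h.1
      have hm := List.length_pos_iff.mpr h.2
      have hmin : min nao.length ken.length =
          min nao.dropLast.length ken.dropLast.length + 1 := by
        simp only [List.length_dropLast]; omega
      have hra : nao.reverse = nao.getLast h.1 :: nao.dropLast.reverse := by
        conv_lhs => rw [← List.dropLast_append_getLast h.1]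
        simp
      have hrk : ken.reverse = ken.getLast h.2 :: ken.dropLast.reverse := by
        conv_lhs => rw [← List.dropLast_append_getLast h.2]
        simp
      rw [specC, dif_pos h, if_neg hlt, ih, hmin, hra, hrk]
      simp only [specE, if_neg hlt]
  | case3 nao ken h =>
      rw [specC, dif_neg h]
      rcases not_and_or.mp h with h1 | h1
      · have : nao = [] := not_not.mp h1
        subst this; simp [specE]
      · have : ken = [] := not_not.mp h1
        subst this; simp [specE]

-- Fold invariant for B: running the loop body over [t0, …, t0+f-1] starting from point p
-- adds specE f on the reversed suffixes.
theorem fold_eq_specE (nao ken : List Int) :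
    ∀ (f t0 : Nat) (p : Int), 0 ≤ p →
      t0 + f ≤ nao.length → p.toNat + f ≤ ken.length →
      (List.range' t0 f).foldl
        (fun point t =>
          if nao.getD (nao.length - 1 - t) 0 ≥ ken.getD (ken.length - 1 - point.toNat) 0
          then point + 1 else point) p
      = p + specE f (nao.reverse.drop t0) (ken.reverse.drop p.toNat) := by
  intro f
  induction f with
  | zero => intro t0 p hp h1 h2; simp [specE]
  | succ f ih =>
      intro t0 p hp h1 h2
      have ht0 : t0 < nao.reverse.length := by simp; omega
      have hpn : p.toNat < ken.reverse.length := by simp; omega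
      have hdra : nao.reverse.drop t0 =
          nao.reverse[t0]'ht0 :: nao.reverse.drop (t0 + 1) :=
        List.drop_eq_getElem_cons ht0
      have hdrk : ken.reverse.drop p.toNat =
          ken.reverse[p.toNat]'hpn :: ken.reverse.drop (p.toNat + 1) :=
        List.drop_eq_getElem_cons hpn
      have hga : nao.getD (nao.length - 1 - t0) 0 = nao.reverse[t0]'ht0 := by
        rw [List.getElem_reverse]
        exact List.getD_eq_getElem _ _ (by simp at ht0; omega)
      have hgk : ken.getD (ken.length - 1 - p.toNat) 0 = ken.reverse[p.toNat]'hpn := by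
        rw [List.getElem_reverse]
        exact List.getD_eq_getElem _ _ (by simp at hpn; omega)
      have hpt : (p + 1).toNat = p.toNat + 1 := by omega
      rw [List.range'_succ, List.foldl_cons]
      by_cases hcmp : nao.getD (nao.length - 1 - t0) 0 ≥ ken.getD (ken.length - 1 - p.toNat) 0
      · rw [if_pos hcmp, ih (t0 + 1) (p + 1) (by omega) (by omega) (by rw [hpt]; omega)]
        rw [hpt, hdra, hdrk]
        simp only [specE]
        rw [if_neg (by rw [hga, hgk] at hcmp; omega)]
        ring
      · rw [if_neg hcmp, ih (t0 + 1) p hp (by omega) (by omega)]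
        rw [hdra, hdrk]
        simp only [specE]
        rw [if_pos (by rw [hga, hgk] at hcmp; omega)]

-- ===== VERDICT (by name: the statement is the Claim_ definition above) =====
theorem do_py_spec : Claim_equal_do_py := by
  intro nao ken _
  unfold Spec_do_py do_py do_py_alt
  dsimp only
  rw [doPyLoop_eq, specC_eq_specE, List.range_eq_range']
  rw [fold_eq_specE nao ken (min nao.length ken.length) 0 0 le_rfl (by omega) (by simp)]
  simp
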